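-- pv_equiv track=rewrite | github.com/isaacgounton/griot-app | app/services/media/media_conversion_service.py | validate_conversion
-- ===== SOURCE A (Python) =====
-- SUPPORTED_FORMATS = {
--     "audio": {
--         "mp3": {"codec": "libmp3lame", "description": "MP3 Audio"},
--         "wav": {"codec": "pcm_s16le", "description": "WAV Audio"},
--         "flac": {"codec": "flac", "description": "FLAC Lossless Audio"},
--         "aac": {"codec": "aac", "description": "AAC Audio"},
--         "ogg": {"codec": "libvorbis", "description": "Ogg Vorbis"},
--         "oga": {"codec": "libvorbis", "description": "Ogg Audio"},
--         "opus": {"codec": "libopus", "description": "Opus Audio"},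
--         "m4a": {"codec": "aac", "description": "M4A Audio"},
--         "wma": {"codec": "wmav2", "description": "Windows Media Audio"},
--         "ac3": {"codec": "ac3", "description": "AC3 Audio"},
--         "amr": {"codec": "amrnb", "description": "AMR Narrowband"},
--         "au": {"codec": "pcm_s16be", "description": "Au Audio"},
--         "aiff": {"codec": "pcm_s16be", "description": "AIFF Audio"},
--         "dts": {"codec": "dca", "description": "DTS Audio"},
--         "mp2": {"codec": "mp2", "description": "MP2 Audio"},
--         "ape": {"codec": "ape", "description": "Monkey's Audio"},
--         "ra": {"codec": "real_144", "description": "RealAudio"},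
--         "tta": {"codec": "tta", "description": "TTA Lossless Audio"},
--         "wv": {"codec": "wavpack", "description": "WavPack Audio"},
--     },
--     "video": {
--         "mp4": {"codec": "libx264", "description": "MP4 Video (H.264)"},
--         "mp4_h265": {"codec": "libx265", "description": "MP4 Video (H.265/HEVC)"},
--         "mp4_av1": {"codec": "libaom-av1", "description": "MP4 Video (AV1)"},
--         "avi": {"codec": "libx264", "description": "AVI Video"},
--         "mov": {"codec": "libx264", "description": "QuickTime Video"},
--         "mkv": {"codec": "libx264", "description": "Matroska Video (H.264)"},
--         "mkv_h265": {"codec": "libx265", "description": "Matroska Video (H.265/HEVC)"},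
--         "mkv_av1": {"codec": "libaom-av1", "description": "Matroska Video (AV1)"},
--         "webm": {"codec": "libvpx-vp9", "description": "WebM Video (VP9)"},
--         "webm_vp8": {"codec": "libvpx", "description": "WebM Video (VP8)"},
--         "webm_av1": {"codec": "libaom-av1", "description": "WebM Video (AV1)"},
--         "flv": {"codec": "libx264", "description": "Flash Video"},
--         "wmv": {"codec": "wmv2", "description": "Windows Media Video"},
--         "3gp": {"codec": "libx264", "description": "3GP Video"},
--         "ogv": {"codec": "libtheora", "description": "Ogg Video"},
--         "m4v": {"codec": "libx264", "description": "M4V Video"},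
--         "ts": {"codec": "libx264", "description": "MPEG Transport Stream"},
--         "mts": {"codec": "libx264", "description": "AVCHD Video"},
--         "mpg": {"codec": "mpeg2video", "description": "MPEG-1/2 Video"},
--         "mpeg": {"codec": "mpeg2video", "description": "MPEG Video"},
--         "vob": {"codec": "mpeg2video", "description": "DVD Video"},
--         "asf": {"codec": "wmv2", "description": "Advanced Systems Format"},
--         "rm": {"codec": "rv20", "description": "RealMedia Video"},
--         "divx": {"codec": "libx264", "description": "DivX Video"},
--         "xvid": {"codec": "libx264", "description": "Xvid Video"},
--     },
--     "image": {
--         "jpg": {"description": "JPEG Image"},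
--         "jpeg": {"description": "JPEG Image"},
--         "png": {"description": "PNG Image"},
--         "webp": {"description": "WebP Image"},
--         "bmp": {"description": "Bitmap Image"},
--         "tiff": {"description": "TIFF Image"},
--         "gif": {"description": "GIF Image"},
--         "ico": {"description": "Icon Image"},
--         "svg": {"description": "SVG Vector Image"},
--         "avif": {"description": "AVIF Image"},
--         "heif": {"description": "HEIF Image"},
--         "jxl": {"description": "JPEG XL Image"},
--     }
-- }
--
-- def validate_conversion(input_type: str, output_format: str) -> bool:
--     """Validate if conversion is possible"""
--     if output_format in SUPPORTED_FORMATS.get(input_type, {}):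
--         return True
--
--     valid_cross_conversions = {
--         ('video', 'audio'): True,
--         ('image', 'video'): True,
--         ('video', 'image'): True,
--     }
--
--     for output_type, formats in SUPPORTED_FORMATS.items():
--         if output_format in formats:
--             return valid_cross_conversions.get((input_type, output_type), False)
--
--     return False
-- ===== SOURCE B (Python) =====
-- SUPPORTED_FORMATS = {
--     "audio": {
--         "mp3": {"codec": "libmp3lame", "description": "MP3 Audio"},
--         "wav": {"codec": "pcm_s16le", "description": "WAV Audio"},
--         "flac": {"codec": "flac", "description": "FLAC Lossless Audio"},
--         "aac": {"codec": "aac", "description": "AAC Audio"},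
--         "ogg": {"codec": "libvorbis", "description": "Ogg Vorbis"},
--         "oga": {"codec": "libvorbis", "description": "Ogg Audio"},
--         "opus": {"codec": "libopus", "description": "Opus Audio"},
--         "m4a": {"codec": "aac", "description": "M4A Audio"},
--         "wma": {"codec": "wmav2", "description": "Windows Media Audio"},
--         "ac3": {"codec": "ac3", "description": "AC3 Audio"},
--         "amr": {"codec": "amrnb", "description": "AMR Narrowband"},
--         "au": {"codec": "pcm_s16be", "description": "Au Audio"},
--         "aiff": {"codec": "pcm_s16be", "description": "AIFF Audio"},
--         "dts": {"codec": "dca", "description": "DTS Audio"},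
--         "mp2": {"codec": "mp2", "description": "MP2 Audio"},
--         "ape": {"codec": "ape", "description": "Monkey's Audio"},
--         "ra": {"codec": "real_144", "description": "RealAudio"},
--         "tta": {"codec": "tta", "description": "TTA Lossless Audio"},
--         "wv": {"codec": "wavpack", "description": "WavPack Audio"},
--     },
--     "video": {
--         "mp4": {"codec": "libx264", "description": "MP4 Video (H.264)"},
--         "mp4_h265": {"codec": "libx265", "description": "MP4 Video (H.265/HEVC)"},
--         "mp4_av1": {"codec": "libaom-av1", "description": "MP4 Video (AV1)"},
--         "avi": {"codec": "libx264", "description": "AVI Video"},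
--         "mov": {"codec": "libx264", "description": "QuickTime Video"},
--         "mkv": {"codec": "libx264", "description": "Matroska Video (H.264)"},
--         "mkv_h265": {"codec": "libx265", "description": "Matroska Video (H.265/HEVC)"},
--         "mkv_av1": {"codec": "libaom-av1", "description": "Matroska Video (AV1)"},
--         "webm": {"codec": "libvpx-vp9", "description": "WebM Video (VP9)"},
--         "webm_vp8": {"codec": "libvpx", "description": "WebM Video (VP8)"},
--         "webm_av1": {"codec": "libaom-av1", "description": "WebM Video (AV1)"},
--         "flv": {"codec": "libx264", "description": "Flash Video"},
--         "wmv": {"codec": "wmv2", "description": "Windows Media Video"},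
--         "3gp": {"codec": "libx264", "description": "3GP Video"},
--         "ogv": {"codec": "libtheora", "description": "Ogg Video"},
--         "m4v": {"codec": "libx264", "description": "M4V Video"},
--         "ts": {"codec": "libx264", "description": "MPEG Transport Stream"},
--         "mts": {"codec": "libx264", "description": "AVCHD Video"},
--         "mpg": {"codec": "mpeg2video", "description": "MPEG-1/2 Video"},
--         "mpeg": {"codec": "mpeg2video", "description": "MPEG Video"},
--         "vob": {"codec": "mpeg2video", "description": "DVD Video"},
--         "asf": {"codec": "wmv2", "description": "Advanced Systems Format"},
--         "rm": {"codec": "rv20", "description": "RealMedia Video"},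
--         "divx": {"codec": "libx264", "description": "DivX Video"},
--         "xvid": {"codec": "libx264", "description": "Xvid Video"},
--     },
--     "image": {
--         "jpg": {"description": "JPEG Image"},
--         "jpeg": {"description": "JPEG Image"},
--         "png": {"description": "PNG Image"},
--         "webp": {"description": "WebP Image"},
--         "bmp": {"description": "Bitmap Image"},
--         "tiff": {"description": "TIFF Image"},
--         "gif": {"description": "GIF Image"},
--         "ico": {"description": "Icon Image"},
--         "svg": {"description": "SVG Vector Image"},
--         "avif": {"description": "AVIF Image"},
--         "heif": {"description": "HEIF Image"},
--         "jxl": {"description": "JPEG XL Image"},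
--     }
-- }
--
-- # Precomputed reverse index: format string -> owning category (first occurrence wins;
-- # categories are iterated in SUPPORTED_FORMATS order, matching A's scan order).
-- FORMAT_TO_TYPE = {}
-- for _cat, _fmts in SUPPORTED_FORMATS.items():
--     for _f in _fmts:
--         FORMAT_TO_TYPE.setdefault(_f, _cat)
--
-- VALID_CROSS = {('video', 'audio'), ('image', 'video'), ('video', 'image')}
--
-- def validate_conversion(input_type: str, output_format: str) -> bool:
--     """Validate if conversion is possible"""
--     output_type = FORMAT_TO_TYPE.get(output_format)
--     if output_type is None:
--         return False
--     if output_type == input_type: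
--         return True
--     return (input_type, output_type) in VALID_CROSS
-- ===== Notes on version B (the rewrite author's own statement) =====
-- stated objective: simpler
-- what changed: Replaces A's per-call linear scan over the three category tables (membership test per category plus a cross-conversion dict lookup inside the loop) with a precomputed reverse index mapping each format to its owning category, so validate_conversion is a single indexed lookup followed by one equality test and one set membership test.
import Mathlib
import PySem

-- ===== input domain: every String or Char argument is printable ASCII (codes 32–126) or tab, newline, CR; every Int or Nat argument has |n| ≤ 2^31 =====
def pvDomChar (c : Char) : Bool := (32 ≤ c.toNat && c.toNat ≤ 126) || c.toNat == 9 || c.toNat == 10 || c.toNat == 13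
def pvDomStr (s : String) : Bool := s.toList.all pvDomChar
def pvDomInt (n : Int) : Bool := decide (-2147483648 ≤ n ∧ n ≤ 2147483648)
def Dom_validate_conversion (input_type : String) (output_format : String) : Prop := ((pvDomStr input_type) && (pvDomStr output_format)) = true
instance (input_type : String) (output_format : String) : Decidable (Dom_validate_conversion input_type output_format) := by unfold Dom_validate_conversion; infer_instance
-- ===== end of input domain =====

-- B replaces A's linear scan over the categories by a precomputed reverse index
-- (format → owning category) and a single lookup; objective: simpler/alternative.

-- ===== PORT A =====
-- The inner per-format dicts (codec/description) are never read, only their keys are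
-- tested with 'in'; each category is therefore represented by its list of keys.
def audioKeys : List String :=
  ["mp3", "wav", "flac", "aac", "ogg", "oga", "opus", "m4a", "wma", "ac3", "amr",
   "au", "aiff", "dts", "mp2", "ape", "ra", "tta", "wv"]
def videoKeys : List String :=
  ["mp4", "mp4_h265", "mp4_av1", "avi", "mov", "mkv", "mkv_h265", "mkv_av1", "webm",
   "webm_vp8", "webm_av1", "flv", "wmv", "3gp", "ogv", "m4v", "ts", "mts", "mpg",
   "mpeg", "vob", "asf", "rm", "divx", "xvid"]
def imageKeys : List String :=
  ["jpg", "jpeg", "png", "webp", "bmp", "tiff", "gif", "ico", "svg", "avif", "heif", "jxl"]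

def supportedFormats : PySem.Dict String (List String) :=
  PySem.Dict.mk [("audio", audioKeys), ("video", videoKeys), ("image", imageKeys)]

def validCrossConversions : PySem.Dict (String × String) Bool :=
  PySem.Dict.mk [(("video", "audio"), true), (("image", "video"), true), (("video", "image"), true)]

-- the 'for output_type, formats in SUPPORTED_FORMATS.items():' loop with its early return
def crossLoop (input_type output_format : String) : List (String × List String) → Bool
  | [] => false
  | (output_type, formats) :: rest =>
      if output_format ∈ formats then validCrossConversions.getD (input_type, output_type) false
      else crossLoop input_type output_format rest

def validate_conversion (input_type : String) (output_format : String) : Bool :=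
  if output_format ∈ ((supportedFormats.get? input_type).getD []) then true
  else crossLoop input_type output_format supportedFormats.items

-- ===== PORT B =====
-- FORMAT_TO_TYPE built by iterating the categories in order, first occurrence kept
-- (setdefault); the format keys are pairwise distinct, so the resulting association
-- list is exactly this concatenation in iteration order.
def formatToType : PySem.Dict String String :=
  PySem.Dict.mk (audioKeys.map (fun f => (f, "audio"))
    ++ videoKeys.map (fun f => (f, "video"))
    ++ imageKeys.map (fun f => (f, "image")))

def validCross : List (String × String) :=
  PySem.Set.ofList [("video", "audio"), ("image", "video"), ("video", "image")]

def validate_conversion_alt (input_type : String) (output_format : String) : Bool :=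
  match formatToType.get? output_format with
  | none => false
  | some output_type =>
      if output_type == input_type then true
      else validCross.contains (input_type, output_type)

-- ===== PRECONDITION & SPEC =====
def Spec_validate_conversion (input_type : String) (output_format : String) (out : Bool) : Prop := out = validate_conversion_alt input_type output_format
instance (input_type : String) (output_format : String) (out : Bool) : Decidable (Spec_validate_conversion input_type output_format out) := by unfold Spec_validate_conversion; infer_instance

-- ===== CLAIM (what is proved, stated in full; the proofs are below) =====
def Claim_equal_validate_conversion : Prop := ∀ (input_type : String) (output_format : String), Dom_validate_conversion input_type output_format → Spec_validate_conversion input_type output_format (validate_conversion input_type output_format)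

-- ===== LEMMAS AND PROOFS =====

-- first-match lookup in a block of pairs all carrying the same category
theorem get?_mk_map_append (ks : List String) (cat : String) (rest : List (String × String)) (x : String) :
    (PySem.Dict.mk (ks.map (fun f => (f, cat)) ++ rest)).get? x
      = if x ∈ ks then some cat else (PySem.Dict.mk rest).get? x := by
  induction ks with
  | nil => simp
  | cons k ks ih =>
      simp only [List.map_cons, List.cons_append, PySem.Dict.get?_mk_cons, ih,
        List.mem_cons]
      by_cases h : k = x
      · subst h; simp
      · simp [h, Ne.symm h]

theorem get?_formatToType (x : String) :
    formatToType.get? x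
      = if x ∈ audioKeys then some "audio"
        else if x ∈ videoKeys then some "video"
        else if x ∈ imageKeys then some "image"
        else none := by
  show (PySem.Dict.mk (audioKeys.map (fun f => (f, "audio"))
    ++ (videoKeys.map (fun f => (f, "video")) ++ imageKeys.map (fun f => (f, "image"))))).get? x = _
  rw [get?_mk_map_append, get?_mk_map_append]
  have : (PySem.Dict.mk (imageKeys.map (fun f => (f, "image")))).get? x
      = if x ∈ imageKeys then some "image" else none := by
    have := get?_mk_map_append imageKeys "image" [] x
    simpa using this
  rw [this]

theorem disj_av : ∀ x ∈ audioKeys, x ∉ videoKeys := by decide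
theorem disj_ai : ∀ x ∈ audioKeys, x ∉ imageKeys := by decide
theorem disj_vi : ∀ x ∈ videoKeys, x ∉ imageKeys := by decide

theorem validate_conversion_eq (input_type output_format : String) :
    validate_conversion input_type output_format
      = validate_conversion_alt input_type output_format := by
  unfold validate_conversion validate_conversion_alt
  rw [get?_formatToType]
  by_cases ha : output_format ∈ audioKeys <;>
  by_cases hv : output_format ∈ videoKeys <;>
  by_cases hi : output_format ∈ imageKeys
  all_goals try exact absurd hv (disj_av _ ha)
  all_goals try exact absurd hi (disj_ai _ ha)
  all_goals try exact absurd hi (disj_vi _ hv)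
  all_goals
    (simp only [ha, hv, hi, if_true, if_false]
     by_cases h1 : "audio" = input_type <;>
     by_cases h2 : "video" = input_type <;>
     by_cases h3 : "image" = input_type <;>
     (try subst h1) <;> (try subst h2) <;> (try subst h3) <;>
     (try simp_all [supportedFormats, crossLoop, validCrossConversions, validCross,
       PySem.Dict.get?, PySem.Dict.getD, PySem.Set.ofList,
       PySem.Set.add, beq_iff_eq, Prod.ext_iff]) <;>
     (first
       | rfl
       | exact fun h => h1 h.symm
       | exact fun h => h2 h.symm
       | exact fun h => h3 h.symm))

-- ===== VERDICT (by name: the statement is the Claim_ definition above) =====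
theorem validate_conversion_spec : Claim_equal_validate_conversion := by
  intro input_type output_format _
  exact validate_conversion_eq input_type output_format
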